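-- pv_equiv track=rewrite | github.com/simondrugan16/PythonTraining | Week 2/Day 11/blackjack_capstone_project.py | ace_totals
-- ===== SOURCE A (Python) =====
-- def ace_totals(num_aces):
--     totals = set([0])
--     for _ in range(num_aces):
--         new_totals = set()
--         for total in totals:
--             new_totals.add(total + 1)
--             new_totals.add(total + 11)
--         totals = new_totals
--     return sorted(totals)
-- ===== SOURCE B (Python) =====
-- def ace_totals(num_aces):
--     n = max(num_aces, 0)
--     return [n + 10 * k for k in range(n + 1)]
-- ===== Notes on version B (the rewrite author's own statement) =====
-- stated objective: faster
-- what changed: Replaces the iterated set-doubling loop (build a new set of t+1/t+11 for every ace, then sort) with the closed form [n+10*k for k in 0..n], emitted already in ascending order.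
import Mathlib
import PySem

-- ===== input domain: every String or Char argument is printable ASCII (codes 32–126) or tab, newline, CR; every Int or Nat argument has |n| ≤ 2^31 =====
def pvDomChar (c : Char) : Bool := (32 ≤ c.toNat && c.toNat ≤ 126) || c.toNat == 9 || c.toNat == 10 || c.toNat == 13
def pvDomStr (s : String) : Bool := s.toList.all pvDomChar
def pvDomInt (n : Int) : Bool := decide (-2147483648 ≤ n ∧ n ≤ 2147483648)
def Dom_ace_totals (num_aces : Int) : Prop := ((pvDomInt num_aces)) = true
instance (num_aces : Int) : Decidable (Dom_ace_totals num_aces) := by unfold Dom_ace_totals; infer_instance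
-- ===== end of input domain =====

-- B replaces the per-ace set-doubling loop with the closed form [n+10*k for k in 0..n], already sorted.

-- ===== PORT A =====
-- A's Python sets are ported as their DISTINCT elements in insertion order (the List T convention for
-- set), kept as a cons-list (reversed at the end of each inner loop) with a hash index so that the
-- membership test of set.add is O(1) as in Python; exact as a set: same elements, no duplicates.
def pyAdd (s : List Int × Std.HashSet Int) (x : Int) : List Int × Std.HashSet Int :=
  if s.2.contains x then s else (x :: s.1, s.2.insert x)

def ace_totals (num_aces : Int) : List Int :=
  let totals : List Int := [0]   -- set([0])
  let totals := (PySem.List.pyRange 0 num_aces 1).foldl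
    (fun totals _ =>
      -- new_totals = set(); for total in totals: new_totals.add(total+1); new_totals.add(total+11)
      ((totals.foldl (fun nt t => pyAdd (pyAdd nt (t + 1)) (t + 11)) ([], ∅)).1).reverse)
    totals
  PySem.List.sorted totals (fun x => x) false

-- ===== PORT B =====
def ace_totals_alt (num_aces : Int) : List Int :=
  let n := max num_aces 0
  (PySem.List.pyRange 0 (n + 1) 1).map (fun k => n + 10 * k)

-- ===== PRECONDITION & SPEC =====
def Spec_ace_totals (num_aces : Int) (out : List Int) : Prop := out = ace_totals_alt num_aces
instance (num_aces : Int) (out : List Int) : Decidable (Spec_ace_totals num_aces out) := by unfold Spec_ace_totals; infer_instance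

-- ===== CLAIM (what is proved, stated in full; the proofs are below) =====
def Claim_equal_ace_totals : Prop := ∀ (num_aces : Int), Dom_ace_totals num_aces → Spec_ace_totals num_aces (ace_totals num_aces)

-- ===== LEMMAS AND PROOFS =====

-- the arithmetic progression a, a+10, ..., a+10(m-1)
def arithR (a : Int) (m : Nat) : List Int :=
  (List.range m).map (fun k : Nat => a + 10 * (k : Int))

-- one iteration of A's outer loop
def aceStep (s : List Int) : List Int :=
  ((s.foldl (fun nt t => pyAdd (pyAdd nt (t + 1)) (t + 11)) ([], ∅)).1).reverse

-- invariant of A's inner loop: the state holds exactly a+1, a+11, ..., a+1+10(j-1)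
def AceInv (a : Int) (j : Nat) (st : List Int × Std.HashSet Int) : Prop :=
  st.1 = (arithR (a + 1) j).reverse ∧ ∀ x : Int, st.2.contains x = true ↔ x ∈ arithR (a + 1) j

lemma arithR_succ (a : Int) (m : Nat) :
    arithR a (m + 1) = arithR a m ++ [a + 10 * m] := by
  simp [arithR, List.range_succ]

lemma mem_arithR {a x : Int} {m : Nat} : x ∈ arithR a m ↔ ∃ k : Nat, k < m ∧ x = a + 10 * k := by
  simp [arithR]
  constructor
  · rintro ⟨k, hk, rfl⟩; exact ⟨k, hk, rfl⟩
  · rintro ⟨k, hk, rfl⟩; exact ⟨k, hk, rfl⟩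

lemma pyAdd_of_mem {a : Int} {j : Nat} {st : List Int × Std.HashSet Int} {x : Int}
    (h : AceInv a j st) (hx : x ∈ arithR (a + 1) j) : pyAdd st x = st := by
  unfold pyAdd
  rw [if_pos ((h.2 x).mpr hx)]

lemma pyAdd_of_eq {a : Int} {j : Nat} {st : List Int × Std.HashSet Int} {x : Int}
    (h : AceInv a j st) (hx : x = (a + 1) + 10 * j) : AceInv a (j + 1) (pyAdd st x) := by
  have hnot : x ∉ arithR (a + 1) j := by
    rw [mem_arithR]
    rintro ⟨k, hk, he⟩
    have : (k : Int) < j := by exact_mod_cast hk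
    omega
  have hc : st.2.contains x = false := by
    cases hcc : st.2.contains x with
    | false => rfl
    | true => exact absurd ((h.2 x).mp hcc) hnot
  unfold pyAdd
  rw [if_neg (by simp [hc])]
  constructor
  · show x :: st.1 = (arithR (a + 1) (j + 1)).reverse
    rw [arithR_succ, List.reverse_append, h.1, hx]
    rfl
  · intro y
    rw [Std.HashSet.contains_insert, arithR_succ]
    subst hx
    simp only [Bool.or_eq_true, beq_iff_eq, h.2 y, List.mem_append, List.mem_singleton]
    constructor
    · rintro (h' | h')
      · exact Or.inr h'.symm
      · exact Or.inl h'
    · rintro (h' | h')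
      · exact Or.inr h'
      · exact Or.inl h'.symm

lemma inv_empty (a : Int) : AceInv a 0 (([], ∅) : List Int × Std.HashSet Int) := by
  constructor
  · rfl
  · intro x
    simp [arithR]

lemma inner_inv (a : Int) (m : Nat) :
    AceInv a (m + 2)
      ((arithR a (m + 1)).foldl (fun nt t => pyAdd (pyAdd nt (t + 1)) (t + 11)) ([], ∅)) := by
  induction m with
  | zero =>
      have h1 := pyAdd_of_eq (inv_empty a) (x := a + 10 * ((0 : Nat) : Int) + 1) (by push_cast; ring)
      have h2 := pyAdd_of_eq h1 (x := a + 10 * ((0 : Nat) : Int) + 11) (by push_cast; ring)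
      simpa [arithR] using h2
  | succ m ih =>
      rw [arithR_succ a (m + 1), List.foldl_append]
      simp only [List.foldl_cons, List.foldl_nil]
      rw [pyAdd_of_mem ih (by
        rw [mem_arithR]
        exact ⟨m + 1, by omega, by push_cast; ring⟩)]
      exact pyAdd_of_eq ih (by push_cast; ring)

lemma aceStep_arithR (a : Int) (m : Nat) :
    aceStep (arithR a (m + 1)) = arithR (a + 1) (m + 2) := by
  unfold aceStep
  rw [(inner_inv a m).1, List.reverse_reverse]

lemma foldl_const_iterate (f : List Int → List Int) :
    ∀ (l : List Int) (init : List Int),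
      l.foldl (fun s _ => f s) init = f^[l.length] init := by
  intro l
  induction l with
  | nil => intro init; simp
  | cons x xs ih =>
      intro init
      simp [List.foldl_cons, ih, Function.iterate_succ_apply]

lemma iterate_aceStep (n : Nat) : aceStep^[n] (arithR 0 1) = arithR n (n + 1) := by
  induction n with
  | zero => simp
  | succ n ih =>
      rw [Function.iterate_succ_apply', ih, aceStep_arithR]
      push_cast
      ring_nf

lemma arithR_pairwise (a : Int) (m : Nat) : (arithR a m).Pairwise (fun x y => x ≤ y) := by
  have h : (List.range m).Pairwise (fun (i j : Nat) => a + 10 * (i : Int) ≤ a + 10 * (j : Int)) :=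
    List.Pairwise.imp
      (fun {i j} h => by
        have : (i : Int) < j := by exact_mod_cast h
        omega)
      List.pairwise_lt_range
  unfold arithR
  exact List.pairwise_map.mpr h

-- ===== VERDICT (by name: the statement is the Claim_ definition above) =====
theorem ace_totals_spec : Claim_equal_ace_totals := by
  intro num_aces _
  show ace_totals num_aces = ace_totals_alt num_aces
  have hfold : (PySem.List.pyRange 0 num_aces 1).foldl
      (fun totals _ =>
        ((totals.foldl (fun nt t => pyAdd (pyAdd nt (t + 1)) (t + 11)) ([], ∅)).1).reverse)
      ([0] : List Int)
      = arithR ((num_aces - 0).toNat : Nat) ((num_aces - 0).toNat + 1) := by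
    have h := foldl_const_iterate aceStep (PySem.List.pyRange 0 num_aces 1) [0]
    rw [PySem.List.length_pyRange_one] at h
    have h0 : ([0] : List Int) = arithR 0 1 := by decide
    rw [h0, iterate_aceStep] at h
    exact h
  have hA : ace_totals num_aces
      = PySem.List.sorted (arithR ((num_aces - 0).toNat : Nat) ((num_aces - 0).toNat + 1)) (fun x => x) false :=
    congrArg (fun s => PySem.List.sorted s (fun x => x) false) hfold
  rw [hA, PySem.List.sorted_eq_self_of_pairwise _ (fun x => x) (arithR_pairwise _ _)]
  show arithR ((num_aces - 0).toNat : Nat) ((num_aces - 0).toNat + 1)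
      = (PySem.List.pyRange 0 (max num_aces 0 + 1) 1).map (fun k => max num_aces 0 + 10 * k)
  unfold arithR
  rw [PySem.List.pyRange_one, List.map_map]
  have hn : (max num_aces 0 + 1 - 0).toNat = (num_aces - 0).toNat + 1 := by omega
  rw [hn]
  apply List.map_congr_left
  intro k _
  simp only [Function.comp]
  omega
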